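-- pv_equiv track=rewrite | github.com/hchulvej/projecteuler | euler_120.py | max_remainder
-- ===== SOURCE A (Python) =====
-- def remainder(a, n):
--     if n % 2 == 0:
--         return 2
--     return (2 * n * a) % (a * a)
--
-- def max_remainder(a):
--     lim = a * a - 1
--     max_r = 2
--     for n in range(1, lim + 1, 2):
--         r = remainder(a, n)
--         if r == lim:
--             return r
--         if r > max_r:
--             max_r = r
--     return max_r
-- ===== SOURCE B (Python) =====
-- def max_remainder(a):
--     # Closed form: for odd n, (2*n*a) % (a*a) = a * ((2*n) % a); over the scanned
--     # odd n the residue (2*n) % a attains every value of its parity class, so the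
--     # maximum is b*(b-1) for odd b = abs(a) and b*(b-2) for even b, floored at the
--     # initial accumulator value 2.
--     b = abs(a)
--     m = b * (b - 1) if b % 2 else b * (b - 2)
--     return max(2, m)
-- ===== Notes on version B (the rewrite author's own statement) =====
-- stated objective: faster
-- what changed: Replaces the O(a^2) scan of all odd n (computing (2na) mod a^2 each time) with an O(1) closed form max(2, b*(b-1)) for odd b=|a| and max(2, b*(b-2)) for even b, justified by (2na) mod a^2 = a*((2n) mod a) and the attained extremal residue.
import Mathlib
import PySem

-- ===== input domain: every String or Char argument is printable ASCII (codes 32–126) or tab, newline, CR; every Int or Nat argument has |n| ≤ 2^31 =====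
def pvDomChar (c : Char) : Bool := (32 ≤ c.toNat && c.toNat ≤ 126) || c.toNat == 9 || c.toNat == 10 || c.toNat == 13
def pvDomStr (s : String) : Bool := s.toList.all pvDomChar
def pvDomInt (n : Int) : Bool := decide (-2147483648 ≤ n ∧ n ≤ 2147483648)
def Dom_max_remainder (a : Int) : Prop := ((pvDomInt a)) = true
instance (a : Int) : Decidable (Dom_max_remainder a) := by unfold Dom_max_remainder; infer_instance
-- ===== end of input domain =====

-- B replaces A's quadratic scan of the odd n with a closed form in |a| (objective: faster).

-- ===== PORT A =====
def remainder (a n : Int) : Int :=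
  if PySem.Int.mod n 2 = 0 then 2
  else PySem.Int.mod (2 * n * a) (a * a)

def maxLoopA (a lim : Int) : List Int → Int → Int
  | [], maxR => maxR
  | n :: ns, maxR =>
    let r := remainder a n
    if r = lim then r
    else if r > maxR then maxLoopA a lim ns r
    else maxLoopA a lim ns maxR

def max_remainder (a : Int) : Int :=
  let lim := a * a - 1
  maxLoopA a lim (PySem.List.pyRange 1 (lim + 1) 2) 2

-- ===== PORT B =====
def max_remainder_alt (a : Int) : Int :=
  let b := |a|
  let m := if PySem.Int.mod b 2 ≠ 0 then b * (b - 1) else b * (b - 2)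
  max 2 m

-- ===== PRECONDITION & SPEC =====
def Spec_max_remainder (a : Int) (out : Int) : Prop := out = max_remainder_alt a
instance (a : Int) (out : Int) : Decidable (Spec_max_remainder a out) := by unfold Spec_max_remainder; infer_instance

-- ===== CLAIM (what is proved, stated in full; the proofs are below) =====
def Claim_equal_max_remainder : Prop := ∀ (a : Int), Dom_max_remainder a → Spec_max_remainder a (max_remainder a)

-- ===== LEMMAS AND PROOFS =====

-- the value of B's inner expression, as a proof-side abbreviation
def mVal (a : Int) : Int :=
  if PySem.Int.mod |a| 2 ≠ 0 then |a| * (|a| - 1) else |a| * (|a| - 2)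

theorem alt_eq_max (a : Int) : max_remainder_alt a = max 2 (mVal a) := rfl

theorem mVal_even_cond (a : Int) : PySem.Int.mod |a| 2 = 0 ↔ (2:Int) ∣ a := by
  rw [PySem.Int.mod_eq_zero_iff_dvd]; exact dvd_abs 2 a

-- uniqueness of Python's floored mod, positive divisor
theorem modEq_pos (x b m : Int) (hb : 0 < b) (h0 : 0 ≤ m) (h1 : m < b)
    (hd : b ∣ x - m) : PySem.Int.mod x b = m := by
  obtain ⟨k, hk⟩ := hd
  rw [PySem.Int.mod_eq_emod_of_pos hb]
  have hx : x = m + b * k := by linarith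
  rw [hx, Int.add_mul_emod_self_left, Int.emod_eq_of_lt h0 h1]

-- uniqueness of Python's floored mod, negative divisor
theorem modEq_neg (x b m : Int) (hb : b < 0) (h0 : b < m) (h1 : m ≤ 0)
    (hd : b ∣ x - m) : PySem.Int.mod x b = m := by
  have hmb := PySem.Int.mod_neg_bounds x hb
  have hrep := PySem.Int.floordiv_mul_add_mod x b
  have hd2 : b ∣ PySem.Int.mod x b - m := by
    obtain ⟨k, hk⟩ := hd
    exact ⟨k - PySem.Int.floordiv x b, by linarith⟩
  have hd3 : (-b) ∣ PySem.Int.mod x b - m := (neg_dvd).mpr hd2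
  have habs : |PySem.Int.mod x b - m| < -b :=
    abs_lt.mpr ⟨by linarith [hmb.1, hmb.2], by linarith [hmb.1, hmb.2]⟩
  have hz := Int.eq_zero_of_abs_lt_dvd hd3 habs
  linarith

-- key simplification: (2*n*a) % (a*a) = a * ((2*n) % a)  for a ≠ 0
theorem mod_sq (a n : Int) (ha : a ≠ 0) :
    PySem.Int.mod (2 * n * a) (a * a) = a * PySem.Int.mod (2 * n) a := by
  have haa : (0:Int) < a * a := mul_self_pos.mpr ha
  set m := PySem.Int.mod (2 * n) a with hm
  have hrep := PySem.Int.floordiv_mul_add_mod (2 * n) a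
  rw [← hm] at hrep
  have hbounds : 0 ≤ a * m ∧ a * m < a * a := by
    rcases lt_or_gt_of_ne ha with hneg | hpos
    · have h := PySem.Int.mod_neg_bounds (2 * n) hneg
      rw [← hm] at h
      have h0 := mul_nonneg (neg_nonneg.mpr hneg.le) (neg_nonneg.mpr h.2)
      exact ⟨by nlinarith [h0], mul_lt_mul_of_neg_left h.1 hneg⟩
    · have h1 := PySem.Int.mod_nonneg (2 * n) hpos
      have h2 := PySem.Int.mod_lt (2 * n) hpos
      rw [← hm] at h1 h2
      exact ⟨mul_nonneg (le_of_lt hpos) h1, mul_lt_mul_of_pos_left h2 hpos⟩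
  rw [PySem.Int.mod_eq_emod_of_pos haa]
  have hx : 2 * n * a = a * m + (a * a) * PySem.Int.floordiv (2 * n) a := by
    linear_combination (-a) * hrep
  rw [hx, Int.add_mul_emod_self_left, Int.emod_eq_of_lt hbounds.1 hbounds.2]

-- parity: 2 ∣ a → 2 ∣ (2*n) % a
theorem mod_even (a n : Int) (he : (2:Int) ∣ a) : (2:Int) ∣ PySem.Int.mod (2 * n) a := by
  have hrep := PySem.Int.floordiv_mul_add_mod (2 * n) a
  obtain ⟨c, hc⟩ := he
  exact ⟨n - PySem.Int.floordiv (2 * n) a * c, by linear_combination hrep - PySem.Int.floordiv (2 * n) a * hc⟩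

-- upper bound: a * ((2n) % a) ≤ mVal a
theorem r_le_mVal (a n : Int) (ha : a ≠ 0) : a * PySem.Int.mod (2 * n) a ≤ mVal a := by
  set m := PySem.Int.mod (2 * n) a with hm
  unfold mVal
  by_cases he : (2:Int) ∣ a
  · rw [if_neg (not_not.mpr ((mVal_even_cond a).mpr he))]
    obtain ⟨c, hc⟩ := mod_even a n he
    rw [← hm] at hc
    obtain ⟨d, hd⟩ := he
    rcases lt_or_gt_of_ne ha with hneg | hpos
    · have hb := PySem.Int.mod_neg_bounds (2 * n) hneg
      rw [← hm] at hb
      have hm2 : a + 2 ≤ m := by omega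
      calc a * m ≤ a * (a + 2) := mul_le_mul_of_nonpos_left hm2 (le_of_lt hneg)
        _ = |a| * (|a| - 2) := by rw [abs_of_neg hneg]; ring
    · have h1 := PySem.Int.mod_lt (2 * n) hpos
      rw [← hm] at h1
      have hm2 : m ≤ a - 2 := by omega
      calc a * m ≤ a * (a - 2) := mul_le_mul_of_nonneg_left hm2 (le_of_lt hpos)
        _ = |a| * (|a| - 2) := by rw [abs_of_pos hpos]
  · rw [if_pos (fun h0 => he ((mVal_even_cond a).mp h0))]
    rcases lt_or_gt_of_ne ha with hneg | hpos
    · have hb := PySem.Int.mod_neg_bounds (2 * n) hneg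
      rw [← hm] at hb
      have hm2 : a + 1 ≤ m := by omega
      calc a * m ≤ a * (a + 1) := mul_le_mul_of_nonpos_left hm2 (le_of_lt hneg)
        _ = |a| * (|a| - 1) := by rw [abs_of_neg hneg]; ring
    · have h1 := PySem.Int.mod_lt (2 * n) hpos
      rw [← hm] at h1
      have hm2 : m ≤ a - 1 := by omega
      calc a * m ≤ a * (a - 1) := mul_le_mul_of_nonneg_left hm2 (le_of_lt hpos)
        _ = |a| * (|a| - 1) := by rw [abs_of_pos hpos]

-- the loop never hits the early return: a ∤ a²-1 for |a| ≥ 2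
theorem r_ne_lim (a n : Int) (ha : 2 ≤ |a|) (hodd : ¬ PySem.Int.mod n 2 = 0) :
    remainder a n ≠ a * a - 1 := by
  have ha0 : a ≠ 0 := by intro h; rw [h] at ha; simp at ha
  unfold remainder
  rw [if_neg hodd, mod_sq a n ha0]
  intro h
  have hdvd : a ∣ (1:Int) := ⟨a - PySem.Int.mod (2 * n) a, by linear_combination h⟩
  rcases Int.isUnit_iff.mp (isUnit_of_dvd_one hdvd) with h1 | h1 <;>
    rw [h1] at ha <;> norm_num at ha

-- attainment: some scanned odd n achieves mVal a
theorem attained (a : Int) (ha : 2 ≤ |a|) :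
    ∃ n ∈ PySem.List.pyRange 1 (a * a) 2,
      ¬ PySem.Int.mod n 2 = 0 ∧ a * PySem.Int.mod (2 * n) a = mVal a := by
  have ha0 : a ≠ 0 := by intro h; rw [h] at ha; simp at ha
  have hsq' : a * a = |a| * |a| := (abs_mul_abs_self a).symm
  have hsq : 2 * |a| ≤ a * a := by
    rw [hsq']
    nlinarith [mul_nonneg (sub_nonneg.mpr ha) (abs_nonneg a)]
  by_cases he : (2:Int) ∣ a
  · -- even |a|: witness n = a-1 if a > 0, n = 1 if a < 0
    have hmv : mVal a = |a| * (|a| - 2) := by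
      unfold mVal
      rw [if_neg (not_not.mpr ((mVal_even_cond a).mpr he))]
    rcases lt_or_gt_of_ne ha0 with hneg | hpos
    · have ha2 : a ≤ -2 := by rw [abs_of_neg hneg] at ha; linarith
      refine ⟨1, ?_, by decide, ?_⟩
      · rw [PySem.List.mem_pyRange_iff_of_pos (by norm_num)]
        refine ⟨le_refl _, by rw [abs_of_neg hneg] at hsq; linarith, ⟨0, by ring⟩⟩
      · have hmod : PySem.Int.mod (2 * 1) a = a + 2 :=
          modEq_neg _ _ _ hneg (by linarith) (by linarith) ⟨-1, by ring⟩
        rw [hmod, hmv, abs_of_neg hneg]; ring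
    · have ha2 : 2 ≤ a := by rw [abs_of_pos hpos] at ha; linarith
      obtain ⟨c, hc⟩ := he
      refine ⟨a - 1, ?_, ?_, ?_⟩
      · rw [PySem.List.mem_pyRange_iff_of_pos (by norm_num)]
        refine ⟨by linarith, by rw [abs_of_pos hpos] at hsq; linarith, ⟨c - 1, by omega⟩⟩
      · rw [PySem.Int.mod_eq_zero_iff_dvd]
        intro hd; obtain ⟨k, hk⟩ := hd; omega
      · have hmod : PySem.Int.mod (2 * (a - 1)) a = a - 2 :=
          modEq_pos _ _ _ hpos (by linarith) (by linarith) ⟨1, by ring⟩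
        rw [hmod, hmv, abs_of_pos hpos]
  · -- odd |a|: 2n ≡ a - sign(a) (mod a), n shifted by |a| if needed to be odd
    have habs2 : ¬ (2:Int) ∣ |a| := fun h => he ((dvd_abs 2 a).mp h)
    have hmv : mVal a = |a| * (|a| - 1) := by
      unfold mVal
      rw [if_pos (fun h0 => he ((mVal_even_cond a).mp h0))]
    have h3 : 3 ≤ |a| := by
      by_contra hlt
      rcases abs_cases a with ⟨hab, _⟩ | ⟨hab, _⟩ <;> rw [hab] at ha hlt <;>
        exact he (by omega)
    have ha9 : 9 ≤ a * a := by
      rw [hsq']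
      nlinarith [mul_le_mul h3 h3 (by norm_num) (abs_nonneg a)]
    set s : Int := if 0 < a then 1 else -1 with hs
    have hpar : (2:Int) ∣ a * a - s := by
      rcases Int.even_or_odd a with hev | hod
      · exact absurd hev.two_dvd he
      · obtain ⟨c, hc⟩ := hod
        rw [hs]; split_ifs
        · exact ⟨2*c*c + 2*c, by rw [hc]; ring⟩
        · exact ⟨2*c*c + 2*c + 1, by rw [hc]; ring⟩
    obtain ⟨k, hk⟩ := hpar
    have hs1 : s = 1 ∨ s = -1 := by rw [hs]; split_ifs <;> simp
    have hkb : |a| + 1 ≤ k ∧ k < a * a := by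
      constructor
      · rcases hs1 with h | h <;> rw [h] at hk <;>
          nlinarith [hsq', mul_le_mul h3 h3 (by norm_num : (0:ℤ) ≤ 3) (abs_nonneg a)]
      · rcases hs1 with h | h <;> rw [h] at hk <;> linarith
    set n : Int := if (2:Int) ∣ k then k - |a| else k with hn
    have hnodd : ¬ (2:Int) ∣ n := by
      rw [hn]; split_ifs with h2
      · obtain ⟨u, hu⟩ := h2
        intro hd; obtain ⟨v, hv⟩ := hd
        exact habs2 ⟨u - v, by linarith⟩
      · exact h2
    have hnb : 1 ≤ n ∧ n < a * a := by
      rw [hn]; split_ifs <;> constructor <;> linarith [hkb.1, hkb.2, h3]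
    have hdvd : a ∣ 2 * n - (a - s) := by
      rw [hn]; split_ifs with h2
      · rcases abs_cases a with ⟨hab, _⟩ | ⟨hab, _⟩
        · exact ⟨a - 3, by rw [hab]; linear_combination -hk⟩
        · exact ⟨a + 1, by rw [hab]; linear_combination -hk⟩
      · exact ⟨a - 1, by linear_combination -hk⟩
    have hms : a * PySem.Int.mod (2 * n) a = mVal a := by
      rcases lt_or_gt_of_ne ha0 with hneg | hpos
      · have hs' : s = -1 := by rw [hs, if_neg (not_lt.mpr (le_of_lt hneg))]
        have ha3 : a ≤ -3 := by rw [abs_of_neg hneg] at h3; linarith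
        rw [hs'] at hdvd
        have hmod : PySem.Int.mod (2 * n) a = a + 1 :=
          modEq_neg _ _ _ hneg (by linarith) (by linarith)
            (by rw [show a - (-1:ℤ) = a + 1 by ring] at hdvd; exact hdvd)
        rw [hmod, hmv, abs_of_neg hneg]; ring
      · have hs' : s = 1 := by rw [hs, if_pos hpos]
        have ha3 : 3 ≤ a := by rw [abs_of_pos hpos] at h3; linarith
        rw [hs'] at hdvd
        have hmod : PySem.Int.mod (2 * n) a = a - 1 :=
          modEq_pos _ _ _ hpos (by linarith) (by linarith) hdvd
        rw [hmod, hmv, abs_of_pos hpos]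
    refine ⟨n, ?_, ?_, hms⟩
    · rw [PySem.List.mem_pyRange_iff_of_pos (by norm_num)]
      exact ⟨hnb.1, hnb.2, by omega⟩
    · rw [PySem.Int.mod_eq_zero_iff_dvd]; exact hnodd

-- the loop is a running max when the early return never fires
theorem loop_eq_foldl (a lim : Int) (l : List Int) (m : Int)
    (h : ∀ n ∈ l, remainder a n ≠ lim) :
    maxLoopA a lim l m = l.foldl (fun acc n => max acc (remainder a n)) m := by
  induction l generalizing m with
  | nil => rfl
  | cons x xs ih =>
    simp only [maxLoopA, List.foldl_cons]
    rw [if_neg (h x List.mem_cons_self)]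
    have hmax : max m (remainder a x) = if remainder a x > m then remainder a x else m := by
      split_ifs with h2
      · exact max_eq_right (le_of_lt h2)
      · exact max_eq_left (not_lt.mp h2)
    rw [hmax]
    split_ifs with h2 <;> exact ih _ (fun n hn => h n (List.mem_cons_of_mem _ hn))

-- a running max is bounded by any common bound
theorem foldl_max_le (l : List Int) (f : Int → Int) (c m : Int) (hm : m ≤ c)
    (h : ∀ n ∈ l, f n ≤ c) : l.foldl (fun acc n => max acc (f n)) m ≤ c := by
  induction l generalizing m with
  | nil => exact hm
  | cons x xs ih =>
    simp only [List.foldl_cons]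
    exact ih _ (max_le hm (h x List.mem_cons_self)) (fun n hn => h n (List.mem_cons_of_mem _ hn))

-- ===== VERDICT (by name: the statement is the Claim_ definition above) =====
theorem max_remainder_spec : Claim_equal_max_remainder := by
  intro a _
  unfold Spec_max_remainder
  by_cases hsmall : a = -1 ∨ a = 0 ∨ a = 1
  · rcases hsmall with h | h | h <;> subst h <;> decide
  · have ha : 2 ≤ |a| := by
      rcases abs_cases a with ⟨hab, _⟩ | ⟨hab, _⟩ <;> omega
    have ha0 : a ≠ 0 := by intro h; rw [h] at ha; simp at ha
    have hlim : a * a - 1 + 1 = a * a := by ring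
    have hodd : ∀ n ∈ PySem.List.pyRange 1 (a * a) 2, ¬ PySem.Int.mod n 2 = 0 := by
      intro n hn
      rw [PySem.List.mem_pyRange_iff_of_pos (by norm_num)] at hn
      rw [PySem.Int.mod_eq_zero_iff_dvd]
      obtain ⟨k, hk⟩ := hn.2.2
      intro hd; obtain ⟨j, hj⟩ := hd; omega
    have hne : ∀ n ∈ PySem.List.pyRange 1 (a * a) 2, remainder a n ≠ a * a - 1 :=
      fun n hn => r_ne_lim a n ha (hodd n hn)
    have hval : ∀ n ∈ PySem.List.pyRange 1 (a * a) 2,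
        remainder a n = a * PySem.Int.mod (2 * n) a := by
      intro n hn
      unfold remainder
      rw [if_neg (hodd n hn), mod_sq a n ha0]
    show maxLoopA a (a*a-1) (PySem.List.pyRange 1 (a*a-1+1) 2) 2 = max_remainder_alt a
    rw [hlim, alt_eq_max, loop_eq_foldl a _ _ 2 hne]
    set L := PySem.List.pyRange 1 (a * a) 2 with hL
    have hub : L.foldl (fun acc n => max acc (remainder a n)) 2 ≤ max 2 (mVal a) := by
      apply foldl_max_le _ _ _ _ (le_max_left _ _)
      intro n hn
      rw [hval n hn]
      exact le_trans (r_le_mVal a n ha0) (le_max_right _ _)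
    have hlb := PySem.List.le_foldl_max_int L (fun n => remainder a n) 2
    obtain ⟨nw, hnw, hnwodd, hnwval⟩ := attained a ha
    have hlb2 : mVal a ≤ L.foldl (fun acc n => max acc (remainder a n)) 2 := by
      have hle := hlb.2 nw hnw
      rw [hval nw hnw, hnwval] at hle
      exact hle
    exact le_antisymm hub (max_le hlb.1 hlb2)
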